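-- pv_equiv track=rewrite | github.com/Darveloper1/ubscc2025 | app.py | double_consonants
-- ===== SOURCE A (Python) =====
-- VOWELS = set("aeiouAEIOU")
--
-- def double_consonants(x: str) -> str:
--     def proc(w):
--         out = []
--         for c in w:
--             out.append(c)
--             if c.isalpha() and c not in VOWELS:
--                 out.append(c)
--         return "".join(out)
--     return " ".join(proc(w) for w in x.split(" "))
-- ===== SOURCE B (Python) =====
-- VOWELS = "aeiouAEIOU"
--
-- def double_consonants(x: str) -> str:
--     return "".join(c + c if c.isalpha() and c not in VOWELS else c for c in x)
-- ===== Notes on version B (the rewrite author's own statement) =====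
-- stated objective: simpler
-- what changed: Drops the word-split/proc/rejoin machinery and the explicit accumulator loop for a single comprehension over the whole string that emits each character doubled when it is a non-vowel letter; space characters are never consonants, so the split/join wrapper was an identity.
import Mathlib
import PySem

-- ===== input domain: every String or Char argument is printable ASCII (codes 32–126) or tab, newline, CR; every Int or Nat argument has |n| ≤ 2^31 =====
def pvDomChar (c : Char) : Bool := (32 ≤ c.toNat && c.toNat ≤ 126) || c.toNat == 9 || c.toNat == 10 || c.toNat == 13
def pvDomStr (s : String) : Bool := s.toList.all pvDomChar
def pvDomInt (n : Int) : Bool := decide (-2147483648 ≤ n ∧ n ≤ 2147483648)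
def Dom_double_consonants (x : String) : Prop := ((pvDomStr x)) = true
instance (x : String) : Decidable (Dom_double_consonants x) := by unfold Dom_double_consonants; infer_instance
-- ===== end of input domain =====

-- B replaces A's word-split/per-word-loop/rejoin machinery by one comprehension over
-- the whole string (space characters are never consonants, so the word wrapper was an identity); simpler.


-- ===== PORT A =====
-- VOWELS = set("aeiouAEIOU")
def pvVOWELS : PySem.Set Char := PySem.Set.ofList "aeiouAEIOU".toList

-- proc(w): loop appending c, and c again when it is a non-vowel letter; "".join(out)
def pvProcA (w : List Char) : List Char :=
  w.foldl (fun out c =>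
    let out := out ++ [c]
    if PySem.Chars.isalpha c && !(PySem.Set.contains pvVOWELS c) then out ++ [c] else out) []

def double_consonants (x : String) : String :=
  String.ofList (PySem.Chars.join [' '] ((PySem.Chars.splitOn x.toList [' ']).map pvProcA))

-- ===== PORT B =====
-- VOWELS = "aeiouAEIOU"; one comprehension over the whole string
def pvEmitB (c : Char) : List Char :=
  if PySem.Chars.isalpha c && !("aeiouAEIOU".toList.contains c) then [c, c] else [c]

def double_consonants_alt (x : String) : String :=
  String.ofList (x.toList.flatMap pvEmitB)

-- ===== PRECONDITION & SPEC =====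
def Spec_double_consonants (x : String) (out : String) : Prop := out = double_consonants_alt x
instance (x : String) (out : String) : Decidable (Spec_double_consonants x out) := by unfold Spec_double_consonants; infer_instance

-- ===== CLAIM (what is proved, stated in full; the proofs are below) =====
def Claim_equal_double_consonants : Prop := ∀ (x : String), Dom_double_consonants x → Spec_double_consonants x (double_consonants x)

-- ===== LEMMAS AND PROOFS =====

-- simple recursive characterisation of splitting on a single space
def pvMySplit : List Char → List (List Char)
  | [] => [[]]
  | c :: rest => if c = ' ' then [] :: pvMySplit rest else (pvMySplit rest).modifyHead (c :: ·)

theorem pvMySplit_ne_nil (l : List Char) : pvMySplit l ≠ [] := by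
  cases l with
  | nil => simp [pvMySplit]
  | cons c rest =>
    simp only [pvMySplit]
    split
    · simp
    · cases h : pvMySplit rest with
      | nil => exact absurd h (pvMySplit_ne_nil rest)
      | cons a t => simp

theorem pvGo_eq (fuel : Nat) : ∀ (l cur : List Char) (acc : List (List Char)),
    l.length ≤ fuel →
    PySem.Chars.splitOn.go [' '] fuel l cur acc
      = acc.reverse ++ (pvMySplit l).modifyHead (cur.reverse ++ ·) := by
  induction fuel with
  | zero =>
    intro l cur acc h
    have : l = [] := List.eq_nil_of_length_eq_zero (Nat.le_zero.mp h)
    subst this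
    simp [PySem.Chars.splitOn.go, pvMySplit]
  | succ n ih =>
    intro l cur acc h
    cases l with
    | nil => simp [PySem.Chars.splitOn.go, pvMySplit]
    | cons c rest =>
      simp only [PySem.Chars.splitOn.go]
      by_cases hc : c = ' '
      · subst hc
        have hpre : [' '].isPrefixOf (' ' :: rest) = true := by simp [List.isPrefixOf]
        simp only [hpre, if_true, List.length_cons, List.drop_succ_cons, List.length_nil,
          List.drop_zero]
        rw [ih rest [] _ (by simpa using Nat.le_of_succ_le_succ h)]
        simp only [pvMySplit, List.reverse_nil, List.nil_append,
          List.reverse_cons, List.append_assoc, List.singleton_append]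
        cases pvMySplit rest <;> simp
      · have hpre : [' '].isPrefixOf (c :: rest) = false := by
          simp only [List.isPrefixOf, Bool.and_true, beq_eq_false_iff_ne, ne_eq]
          exact fun h => hc h.symm
        simp only [hpre, if_false, Bool.false_eq_true]
        rw [ih rest (c :: cur) acc (by simpa using Nat.le_of_succ_le_succ h)]
        have hne := pvMySplit_ne_nil rest
        cases hms : pvMySplit rest with
        | nil => exact absurd hms hne
        | cons a t => simp [pvMySplit, hc, hms, List.modifyHead]

theorem pvSplitOn_eq (s : List Char) :
    PySem.Chars.splitOn s [' '] = pvMySplit s := by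
  have h := pvGo_eq (s.length + 1) s [] [] (by omega)
  simp only [PySem.Chars.splitOn] at *
  rw [h]
  cases hms : pvMySplit s with
  | nil => exact absurd hms (pvMySplit_ne_nil s)
  | cons a t => simp [List.modifyHead]

-- per-word loop of A computes flatMap of the per-char emitter
theorem pvProcA_eq (w : List Char) : pvProcA w = w.flatMap pvEmitB := by
  suffices h : ∀ (init : List Char),
      w.foldl (fun out c =>
        let out := out ++ [c]
        if PySem.Chars.isalpha c && !(PySem.Set.contains pvVOWELS c) then out ++ [c] else out) init
        = init ++ w.flatMap pvEmitB by
    simpa [pvProcA] using h []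
  induction w with
  | nil => intro init; simp
  | cons c rest ih =>
    intro init
    have hmem : PySem.Set.contains pvVOWELS c = "aeiouAEIOU".toList.contains c := by
      simp only [pvVOWELS, PySem.Set.contains_eq_listContains]
      have : PySem.Set.ofList "aeiouAEIOU".toList = "aeiouAEIOU".toList := by decide
      rw [this]
    simp only [List.foldl_cons, List.flatMap_cons]
    rw [ih, hmem]
    simp only [pvEmitB]
    split_ifs with hcond <;> simp

-- spaces pass through B's emitter unchanged
theorem pvEmitB_space : pvEmitB ' ' = [' '] := by decide

theorem pvJoin_cons (p : List Char) (ps : List (List Char)) :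
    PySem.Chars.join [' '] (p :: ps)
      = p ++ (if ps = [] then [] else ' ' :: PySem.Chars.join [' '] ps) := by
  cases ps with
  | nil => simp [PySem.Chars.join, List.intercalate]
  | cons q qs =>
    simp [PySem.Chars.join, List.intercalate, List.intersperse]

theorem pvJoin_mySplit (s : List Char) :
    PySem.Chars.join [' '] ((pvMySplit s).map (List.flatMap pvEmitB))
      = s.flatMap pvEmitB := by
  induction s with
  | nil => simp [pvMySplit, PySem.Chars.join, List.intercalate]
  | cons c rest ih =>
    simp only [pvMySplit]
    by_cases hc : c = ' '
    · subst hc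
      have hne : (pvMySplit rest).map (List.flatMap pvEmitB) ≠ [] := by
        simp [pvMySplit_ne_nil rest]
      rw [if_pos rfl, List.map_cons, pvJoin_cons]
      simp [hne, ih, pvEmitB_space]
    · simp only [hc, if_false]
      cases hms : pvMySplit rest with
      | nil => exact absurd hms (pvMySplit_ne_nil rest)
      | cons a t =>
        rw [hms] at ih
        simp only [List.modifyHead_cons, List.map_cons, List.flatMap_cons]
        rw [pvJoin_cons]
        rw [List.map_cons, pvJoin_cons] at ih
        rw [List.append_assoc, ih]

-- ===== VERDICT (by name: the statement is the Claim_ definition above) =====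
theorem double_consonants_spec : Claim_equal_double_consonants := by
  intro x _
  show double_consonants x = double_consonants_alt x
  unfold double_consonants double_consonants_alt
  rw [pvSplitOn_eq]
  have : (pvMySplit x.toList).map pvProcA = (pvMySplit x.toList).map (List.flatMap pvEmitB) := by
    exact List.map_congr_left (fun w _ => pvProcA_eq w)
  rw [this, pvJoin_mySplit]
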